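-- pv_equiv track=rewrite | github.com/grokit/dcore | apps/notes_db/ingest.py | splitFlatFileInNoteChunck
-- ===== SOURCE A (Python) =====
-- def detectTitle(line):
--     title = None
--     if len(line) >= 2 and line[0] == '#' and line[1] != '#':
--         title = line[1:].strip()
--     return title
--
-- def splitFlatFileInNoteChunck(lines):
--     """
--     # Note1
--
--     Content1
--
--     #
--
--     Content 2
--
--     # Note3
--
--     Content 3
--
--     Expected: yield 3 notes, second one with empty title.
--     """
--     assert type([]) == type(lines)
--
--     buf = []
--     potTitle = None
--     for line in lines:
--         newTitle = detectTitle(line)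
--         if newTitle != None and potTitle == None:
--             potTitle = newTitle
--         elif newTitle != None and potTitle != None:
--             # We have two titles, can write completed section.
--             asStr = "".join(buf)
--             yield asStr
--
--             buf = []
--             potTitle = newTitle
--             newTitle = None
--         buf.append(line)
--
--     if len(buf) > 0:
--         asStr = "".join(buf)
--         yield asStr
-- ===== SOURCE B (Python) =====
-- def detectTitle(line):
--     title = None
--     if len(line) >= 2 and line[0] == '#' and line[1] != '#':
--         title = line[1:].strip()
--     return title
--
-- def _emit(lines, cuts):
--     # recursively peel off the chunk before the first remaining cut point
--     if not cuts:
--         yield "".join(lines)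
--     else:
--         c = cuts[0]
--         yield "".join(lines[:c])
--         yield from _emit(lines[c:], [x - c for x in cuts[1:]])
--
-- def splitFlatFileInNoteChunck(lines):
--     assert type([]) == type(lines)
--     if not lines:
--         return
--     idxs = [i for i, line in enumerate(lines) if detectTitle(line) is not None]
--     cuts = idxs[1:]  # the first title never splits
--     yield from _emit(lines, cuts)
-- ===== Notes on version B (the rewrite author's own statement) =====
-- stated objective: alternative
-- what changed: Replaces A's single stateful pass (buffer + potential-title flag with yields interleaved) by first collecting the title-line indices, dropping the first one (the first title never splits), and then recursively slicing the line list at those cut points and joining each slice.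
import Mathlib
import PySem

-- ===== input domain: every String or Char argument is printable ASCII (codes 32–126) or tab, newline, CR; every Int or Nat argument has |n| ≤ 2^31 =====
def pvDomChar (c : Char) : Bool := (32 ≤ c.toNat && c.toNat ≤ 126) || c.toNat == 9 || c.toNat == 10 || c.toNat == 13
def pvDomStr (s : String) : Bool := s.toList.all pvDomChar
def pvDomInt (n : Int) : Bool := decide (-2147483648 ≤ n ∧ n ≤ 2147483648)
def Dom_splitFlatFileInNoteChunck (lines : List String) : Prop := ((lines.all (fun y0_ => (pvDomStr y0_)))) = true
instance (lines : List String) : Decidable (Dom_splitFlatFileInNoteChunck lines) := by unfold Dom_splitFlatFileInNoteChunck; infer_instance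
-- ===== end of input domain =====

-- B collects the title-line indices first and slices recursively at the cut points, instead of A's stateful buffer pass (alternative decomposition, same cost).

-- ===== PORT A =====
-- helper shared with B (Source B keeps detectTitle unchanged)
def detectTitle (line : String) : Option String :=
  if PySem.Str.len line ≥ 2 ∧ PySem.Str.pyGet? line 0 = some '#' ∧ PySem.Str.pyGet? line 1 ≠ some '#'
  then some (PySem.Str.strip (PySem.Str.slice line (some 1) none))
  else none

-- the body of A's for-loop; state = (buf, potTitle, yielded output)
def splitStep (s : List String × Option String × List String) (line : String) :
    List String × Option String × List String :=
  let newTitle := detectTitle line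
  let s :=
    if newTitle ≠ none ∧ s.2.1 = none then (s.1, newTitle, s.2.2)
    else if newTitle ≠ none ∧ s.2.1 ≠ none then
      (([] : List String), newTitle, s.2.2 ++ [PySem.Str.join "" s.1])
    else s
  (s.1 ++ [line], s.2.1, s.2.2)

-- the trailing 'if len(buf) > 0: yield "".join(buf)'
def splitFinish (st : List String × Option String × List String) : List String :=
  if st.1.length > 0 then st.2.2 ++ [PySem.Str.join "" st.1] else st.2.2

def splitFlatFileInNoteChunck (lines : List String) : List String :=
  splitFinish (lines.foldl splitStep ([], none, []))

-- ===== PORT B =====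
-- port of Source B's _emit: yield the chunk before the first cut, recurse on the rest
def emitChunks (lines : List String) (cuts : List Int) : List String :=
  match cuts with
  | [] => [PySem.Str.join "" lines]
  | c :: rest =>
      PySem.Str.join "" (PySem.List.slice lines none (some c)) ::
        emitChunks (PySem.List.slice lines (some c) none) (rest.map (fun x => x - c))
termination_by cuts.length
decreasing_by simp

def splitFlatFileInNoteChunck_alt (lines : List String) : List String :=
  if lines = [] then []
  else
    let idxs := ((PySem.List.enumerate lines).filter
        (fun p => decide (detectTitle p.2 ≠ none))).map Prod.fst
    let cuts := PySem.List.slice idxs (some 1) none  -- idxs[1:]: the first title never splits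
    emitChunks lines cuts

-- ===== PRECONDITION & SPEC =====
def Spec_splitFlatFileInNoteChunck (lines : List String) (out : List String) : Prop := out = splitFlatFileInNoteChunck_alt lines
instance (lines : List String) (out : List String) : Decidable (Spec_splitFlatFileInNoteChunck lines out) := by unfold Spec_splitFlatFileInNoteChunck; infer_instance

-- ===== CLAIM (what is proved, stated in full; the proofs are below) =====
def Claim_equal_splitFlatFileInNoteChunck : Prop := ∀ (lines : List String), Dom_splitFlatFileInNoteChunck lines → Spec_splitFlatFileInNoteChunck lines (splitFlatFileInNoteChunck lines)

-- ===== LEMMAS AND PROOFS =====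

-- recursive form of A's loop: current buffer and whether a title has been seen
def chunksA : List String → List String → Bool → List String
  | [], buf, _ => if buf = [] then [] else [PySem.Str.join "" buf]
  | l :: ls, buf, seen =>
    match detectTitle l, seen with
    | some _, true => PySem.Str.join "" buf :: chunksA ls [l] true
    | some _, false => chunksA ls (buf ++ [l]) true
    | none, _ => chunksA ls (buf ++ [l]) seen

-- relative cut indices (Nat): positions where a chunk break happens
def cutsN : List String → Bool → List Nat
  | [], _ => []
  | l :: ls, seen =>
    match detectTitle l, seen with
    | some _, true => 0 :: (cutsN ls true).map (· + 1)
    | some _, false => (cutsN ls true).map (· + 1)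
    | none, _ => (cutsN ls seen).map (· + 1)

-- Nat-level analogue of emitChunks, with the pending buffer made explicit
def cutChunksN (buf : List String) (lines : List String) : List Nat → List String
  | [] => [PySem.Str.join "" (buf ++ lines)]
  | c :: cs =>
      PySem.Str.join "" (buf ++ lines.take c) ::
        cutChunksN [] (lines.drop c) (cs.map (· - c))
termination_by cuts => cuts.length
decreasing_by simp

theorem cutChunksN_nil (buf lines : List String) :
    cutChunksN buf lines [] = [PySem.Str.join "" (buf ++ lines)] := by
  rw [cutChunksN]

theorem cutChunksN_cons (buf lines : List String) (c : Nat) (cs : List Nat) :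
    cutChunksN buf lines (c :: cs) =
      PySem.Str.join "" (buf ++ lines.take c) ::
        cutChunksN [] (lines.drop c) (cs.map (· - c)) := by
  rw [cutChunksN]

theorem emitChunks_nil (lines : List String) :
    emitChunks lines [] = [PySem.Str.join "" lines] := by
  rw [emitChunks]

theorem emitChunks_cons (lines : List String) (c : Int) (cs : List Int) :
    emitChunks lines (c :: cs) =
      PySem.Str.join "" (PySem.List.slice lines none (some c)) ::
        emitChunks (PySem.List.slice lines (some c) none) (cs.map (fun x => x - c)) := by
  rw [emitChunks]

theorem splitStep_title_none (line : String) (buf out : List String)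
    (ht : detectTitle line ≠ none) :
    splitStep (buf, none, out) line = (buf ++ [line], detectTitle line, out) := by
  simp [splitStep, ht]

theorem splitStep_title_some (line : String) (t : String) (buf out : List String)
    (ht : detectTitle line ≠ none) :
    splitStep (buf, some t, out) line =
      ([line], detectTitle line, out ++ [PySem.Str.join "" buf]) := by
  simp [splitStep, ht]

theorem splitStep_notitle (line : String) (buf out : List String) (pot : Option String)
    (ht : detectTitle line = none) :
    splitStep (buf, pot, out) line = (buf ++ [line], pot, out) := by
  simp [splitStep, ht]

theorem cutChunksN_shift (buf : List String) (l : String) (ls : List String)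
    (cs : List Nat) :
    cutChunksN buf (l :: ls) (cs.map (· + 1)) = cutChunksN (buf ++ [l]) ls cs := by
  cases cs with
  | nil =>
      rw [List.map_nil, cutChunksN_nil, cutChunksN_nil]
      simp
  | cons c cs =>
      rw [List.map_cons, cutChunksN_cons, cutChunksN_cons]
      simp only [List.take_succ_cons, List.drop_succ_cons, List.map_map, List.cons.injEq]
      refine ⟨by simp, ?_⟩
      congr 1
      refine List.map_congr_left ?_
      intro x _
      simp only [Function.comp]
      omega

theorem chunksA_eq_cutChunksN (lines : List String) :
    ∀ (buf : List String) (seen : Bool), buf ≠ [] ∨ lines ≠ [] →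
    chunksA lines buf seen = cutChunksN buf lines (cutsN lines seen) := by
  induction lines with
  | nil =>
      intro buf seen h
      have hb : buf ≠ [] := by tauto
      simp [chunksA, cutsN, cutChunksN_nil, hb]
  | cons l ls ih =>
      intro buf seen _
      cases h : detectTitle l with
      | some t =>
          cases seen with
          | false =>
              simp only [chunksA, cutsN, h]
              rw [cutChunksN_shift]
              exact ih (buf ++ [l]) true (by simp)
          | true =>
              simp only [chunksA, cutsN, h, cutChunksN_cons, List.take_zero,
                List.append_nil, List.drop_zero, List.cons.injEq, true_and]
              have h0 : ((cutsN ls true).map (· + 1)).map (· - 0) =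
                  (cutsN ls true).map (· + 1) := by simp
              rw [h0, cutChunksN_shift]
              simp only [List.nil_append]
              exact ih [l] true (by simp)
      | none =>
          simp only [chunksA, cutsN, h]
          rw [cutChunksN_shift]
          exact ih (buf ++ [l]) seen (by simp)

-- the A-side foldl equals chunksA
theorem foldA_eq_chunksA (lines : List String) :
    ∀ (buf : List String) (pot : Option String) (out : List String),
    splitFinish (lines.foldl splitStep (buf, pot, out)) = out ++ chunksA lines buf pot.isSome := by
  induction lines with
  | nil =>
      intro buf pot out
      by_cases hb : buf = [] <;>
        simp [splitFinish, chunksA, hb, List.length_pos_iff]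
  | cons l ls ih =>
      intro buf pot out
      rw [List.foldl_cons]
      cases h : detectTitle l with
      | some t =>
          have hne : detectTitle l ≠ none := by simp [h]
          cases pot with
          | none =>
              rw [splitStep_title_none l buf out hne, ih, h]
              simp [chunksA, h]
          | some t' =>
              rw [splitStep_title_some l t' buf out hne, ih, h]
              simp [chunksA, h]
      | none =>
          rw [splitStep_notitle l buf out pot h, ih]
          cases pot <;> simp [chunksA, h]

-- cutsN is sorted (weakly increasing)
theorem cutsN_pairwise (lines : List String) :
    ∀ seen, (cutsN lines seen).Pairwise (· ≤ ·) := by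
  induction lines with
  | nil => intro seen; simp [cutsN]
  | cons l ls ih =>
      intro seen
      cases h : detectTitle l with
      | some t =>
          cases seen with
          | false =>
              simp only [cutsN, h]
              exact (List.pairwise_map).mpr ((ih true).imp (by omega))
          | true =>
              simp only [cutsN, h]
              refine (List.pairwise_cons).mpr
                ⟨fun x _ => by omega, (List.pairwise_map).mpr ((ih true).imp (by omega))⟩
      | none =>
          simp only [cutsN, h]
          exact (List.pairwise_map).mpr ((ih seen).imp (by omega))

-- emitChunks on cast Nat cuts is cutChunksN (induction on the length of the cut list)
theorem emitChunks_eq_cutChunksN_len (n : Nat) :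
    ∀ (cuts : List Nat) (lines : List String), cuts.length = n → cuts.Pairwise (· ≤ ·) →
    emitChunks lines (cuts.map (fun (k : Nat) => (k : Int))) = cutChunksN [] lines cuts := by
  induction n with
  | zero =>
      intro cuts lines hlen _
      cases cuts with
      | nil => rw [List.map_nil, emitChunks_nil, cutChunksN_nil]; simp
      | cons c cs => simp at hlen
  | succ n ihn =>
      intro cuts lines hlen hp
      cases cuts with
      | nil => simp at hlen
      | cons c cs =>
          have hle : ∀ x ∈ cs, c ≤ x := fun x hx => (List.pairwise_cons.mp hp).1 x hx
          rw [List.map_cons, emitChunks_cons, cutChunksN_cons]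
          simp only [List.nil_append, List.cons.injEq]
          refine ⟨by rw [PySem.List.slice_to_natCast], ?_⟩
          rw [PySem.List.slice_from_natCast]
          have hcast : (cs.map (fun (k : Nat) => (k : Int))).map (fun x => x - (c : Int)) =
              (cs.map (· - c)).map (fun (k : Nat) => (k : Int)) := by
            simp only [List.map_map]
            refine List.map_congr_left ?_
            intro x hx
            have := hle x hx
            simp only [Function.comp]
            omega
          rw [hcast]
          refine ihn (cs.map (· - c)) (lines.drop c) (by simp at hlen ⊢; omega) ?_
          exact (List.pairwise_map).mpr (((List.pairwise_cons.mp hp).2).imp (by omega))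

theorem emitChunks_eq_cutChunksN (cuts : List Nat) (lines : List String)
    (hp : cuts.Pairwise (· ≤ ·)) :
    emitChunks lines (cuts.map (fun (k : Nat) => (k : Int))) = cutChunksN [] lines cuts :=
  emitChunks_eq_cutChunksN_len cuts.length cuts lines rfl hp

-- the enumerate/filter index list equals cutsN · true (cast to Int, shifted by the start)
theorem idxs_eq_cutsN (lines : List String) :
    ∀ (s : Int),
    (((PySem.List.enumerate lines s).filter
        (fun p => decide (detectTitle p.2 ≠ none))).map Prod.fst) =
      (cutsN lines true).map (fun (k : Nat) => s + (k : Int)) := by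
  induction lines with
  | nil => intro s; simp [PySem.List.enumerate_nil, cutsN]
  | cons l ls ih =>
      intro s
      rw [PySem.List.enumerate_cons]
      cases h : detectTitle l with
      | some t =>
          simp only [List.filter_cons, h, ne_eq, reduceCtorEq, not_false_eq_true,
            decide_true, if_true, List.map_cons, cutsN]
          rw [ih (s + 1)]
          simp only [List.map_map, List.cons.injEq]
          refine ⟨by push_cast; ring, ?_⟩
          refine List.map_congr_left ?_
          intro k _
          simp only [Function.comp]
          push_cast
          ring
      | none =>
          simp only [List.filter_cons, h, ne_eq, not_true_eq_false, decide_false,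
            Bool.false_eq_true, if_false, cutsN]
          rw [ih (s + 1)]
          simp only [List.map_map]
          refine List.map_congr_left ?_
          intro k _
          simp only [Function.comp]
          push_cast
          ring

-- dropping the first title index gives the cut list
theorem drop_one_cutsN (lines : List String) :
    (cutsN lines true).drop 1 = cutsN lines false := by
  induction lines with
  | nil => simp [cutsN]
  | cons l ls ih =>
      cases h : detectTitle l with
      | some t => simp [cutsN, h]
      | none =>
          simp only [cutsN, h]
          rw [← List.map_drop, ih]

-- ===== VERDICT (by name: the statement is the Claim_ definition above) =====
theorem splitFlatFileInNoteChunck_spec : Claim_equal_splitFlatFileInNoteChunck := by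
  intro lines _
  unfold Spec_splitFlatFileInNoteChunck
  cases hl : lines with
  | nil => simp [splitFlatFileInNoteChunck, splitFlatFileInNoteChunck_alt, splitFinish]
  | cons l ls =>
      have hA : splitFlatFileInNoteChunck (l :: ls) = chunksA (l :: ls) [] false := by
        have := foldA_eq_chunksA (l :: ls) [] none []
        simpa [splitFlatFileInNoteChunck] using this
      have hB : splitFlatFileInNoteChunck_alt (l :: ls) =
          emitChunks (l :: ls) ((cutsN (l :: ls) false).map (fun (k : Nat) => (k : Int))) := by
        unfold splitFlatFileInNoteChunck_alt
        simp only [reduceCtorEq, if_false]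
        rw [idxs_eq_cutsN (l :: ls) 0, PySem.List.slice_from_one, ← List.drop_one,
          ← List.map_drop, drop_one_cutsN]
        congr 1
        refine List.map_congr_left ?_
        intro k _
        omega
      rw [hA, hB,
        emitChunks_eq_cutChunksN (cutsN (l :: ls) false) (l :: ls)
          (cutsN_pairwise (l :: ls) false),
        chunksA_eq_cutChunksN (l :: ls) [] false (by simp)]
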